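-- pv_equiv track=rewrite | github.com/TejasBhalla/Interview-Simulator | ai-python/app/services/analytics.py | section_analysis
-- ===== SOURCE A (Python) =====
-- def section_analysis(submitted_answers):
--
--     section_data = {}
--
--     for q in submitted_answers:
--         section = q["section"]
--
--         if section not in section_data:
--             section_data[section] = {"correct": 0, "total": 0}
--
--         section_data[section]["total"] += 1
--
--         if q["user_answer"] == q["correct_answer"]:
--             section_data[section]["correct"] += 1
--
--     return section_data
-- ===== SOURCE B (Python) =====
-- def section_analysis(submitted_answers):
--     # Pass 1: group a correctness flag per answer under its section (first-seen order).
--     groups = {}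
--     for q in submitted_answers:
--         groups.setdefault(q["section"], []).append(q["user_answer"] == q["correct_answer"])
--     # Pass 2: tally each section's flags.
--     return {sec: {"correct": sum(flags), "total": len(flags)}
--             for sec, flags in groups.items()}
-- ===== Notes on version B (the rewrite author's own statement) =====
-- stated objective: alternative
-- what changed: A tallies correct/total counters inline in a single pass over the answers; B first groups a per-answer correctness flag by section (insertion order preserved) and then builds each section's {'correct': sum, 'total': len} from its flag list in a second pass.
import Mathlib
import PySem

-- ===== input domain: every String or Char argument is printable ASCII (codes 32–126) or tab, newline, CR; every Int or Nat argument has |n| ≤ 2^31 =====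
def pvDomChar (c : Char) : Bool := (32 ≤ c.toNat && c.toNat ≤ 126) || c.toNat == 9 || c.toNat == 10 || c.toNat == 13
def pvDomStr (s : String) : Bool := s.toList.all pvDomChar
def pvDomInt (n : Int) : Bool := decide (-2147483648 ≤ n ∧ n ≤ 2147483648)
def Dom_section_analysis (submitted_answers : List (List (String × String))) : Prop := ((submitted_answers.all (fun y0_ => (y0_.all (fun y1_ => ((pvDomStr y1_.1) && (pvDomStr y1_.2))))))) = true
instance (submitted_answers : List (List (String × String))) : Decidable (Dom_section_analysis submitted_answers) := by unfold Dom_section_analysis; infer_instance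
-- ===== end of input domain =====

-- B separates the work into two passes — group a correctness flag per section, then tally each
-- group — instead of A's single pass with inline counter updates; objective: alternative decomposition, not speed.

-- q[k] for the answer dict q (association list, first match); Pre_ guarantees the key is present
-- (Python raises KeyError otherwise, and both ports use this same default-"" accessor).
def pvLook (q : List (String × String)) (k : String) : String := (List.lookup k q).getD ""

-- ===== PORT A =====
def section_analysis (submitted_answers : List (List (String × String))) : List (String × List (String × Int)) :=
  let sectionData := submitted_answers.foldl (fun sectionData q =>
    let s := pvLook q "section"
    -- if section not in section_data: section_data[section] = {"correct": 0, "total": 0}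
    let sectionData := if sectionData.contains s then sectionData
      else sectionData.insert s (PySem.Dict.ofList [("correct", (0 : Int)), ("total", 0)])
    -- section_data[section]["total"] += 1
    let sectionData := sectionData.modify s PySem.Dict.empty (fun inner => inner.modify "total" 0 (· + 1))
    -- if q["user_answer"] == q["correct_answer"]: section_data[section]["correct"] += 1
    if pvLook q "user_answer" = pvLook q "correct_answer" then
      sectionData.modify s PySem.Dict.empty (fun inner => inner.modify "correct" 0 (· + 1))
    else sectionData) PySem.Dict.empty
  sectionData.items.map (fun p => (p.1, p.2.items))

-- ===== PORT B =====
def section_analysis_alt (submitted_answers : List (List (String × String))) : List (String × List (String × Int)) :=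
  -- pass 1: groups.setdefault(q["section"], []).append(q["user_answer"] == q["correct_answer"])
  -- (setdefault-then-append on the grouped dict is modify with default [])
  let groups := submitted_answers.foldl (fun groups q =>
    groups.modify (pvLook q "section") []
      (fun flags => flags ++ [decide (pvLook q "user_answer" = pvLook q "correct_answer")]))
    PySem.Dict.empty
  -- pass 2: {sec: {"correct": sum(flags), "total": len(flags)} for sec, flags in groups.items()}
  groups.items.map (fun p =>
    (p.1, [("correct", (p.2.map (fun b => if b then (1 : Int) else 0)).sum),
           ("total", (p.2.length : Int))]))

-- ===== PRECONDITION & SPEC =====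
-- Pre_ excludes exactly the inputs on which Python A raises KeyError: an answer dict missing
-- one of the keys "section", "user_answer", "correct_answer".
def Pre_section_analysis (submitted_answers : List (List (String × String))) : Prop :=
  ∀ q ∈ submitted_answers,
    (List.lookup "section" q).isSome ∧ (List.lookup "user_answer" q).isSome ∧
      (List.lookup "correct_answer" q).isSome
instance (submitted_answers : List (List (String × String))) : Decidable (Pre_section_analysis submitted_answers) := by unfold Pre_section_analysis; infer_instance

def pvWitness_section_analysis : (List (List (String × String))) :=
  [[("section", "math"), ("user_answer", "a"), ("correct_answer", "a")],
   [("section", "math"), ("user_answer", "b"), ("correct_answer", "c")]]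

def Spec_section_analysis (submitted_answers : List (List (String × String))) (out : List (String × List (String × Int))) : Prop := out = section_analysis_alt submitted_answers
instance (submitted_answers : List (List (String × String))) (out : List (String × List (String × Int))) : Decidable (Spec_section_analysis submitted_answers out) := by unfold Spec_section_analysis; infer_instance

-- ===== CLAIM (what is proved, stated in full; the proofs are below) =====
def Claim_equal_section_analysis : Prop := ∀ (submitted_answers : List (List (String × String))), Dom_section_analysis submitted_answers → Pre_section_analysis submitted_answers → Spec_section_analysis submitted_answers (section_analysis submitted_answers)

-- ===== LEMMAS AND PROOFS =====

-- A's loop body, named for the proofs (definitionally the lambda in section_analysis)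
def pvStepA (d : PySem.Dict String (PySem.Dict String Int)) (q : List (String × String)) :
    PySem.Dict String (PySem.Dict String Int) :=
  let s := pvLook q "section"
  let d1 := if d.contains s then d
    else d.insert s (PySem.Dict.ofList [("correct", (0 : Int)), ("total", 0)])
  let d2 := d1.modify s PySem.Dict.empty (fun inner => inner.modify "total" 0 (· + 1))
  if pvLook q "user_answer" = pvLook q "correct_answer" then
    d2.modify s PySem.Dict.empty (fun inner => inner.modify "correct" 0 (· + 1))
  else d2

-- B's loop body, named for the proofs
def pvStepB (g : PySem.Dict String (List Bool)) (q : List (String × String)) :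
    PySem.Dict String (List Bool) :=
  g.modify (pvLook q "section") []
    (fun flags => flags ++ [decide (pvLook q "user_answer" = pvLook q "correct_answer")])

-- the inner counter dict that a flag list denotes
def pvTally (fs : List Bool) : PySem.Dict String Int :=
  PySem.Dict.mk [("correct", (fs.map (fun b => if b then (1 : Int) else 0)).sum),
                 ("total", (fs.length : Int))]

-- B's grouped dict, viewed as A's dict of counter dicts
def pvRep (g : PySem.Dict String (List Bool)) : PySem.Dict String (PySem.Dict String Int) :=
  PySem.Dict.mk (g.items.map (fun p => (p.1, pvTally p.2)))

lemma pvModify_eq_insert {ν : Type} (d : PySem.Dict String ν) (k : String) (d0 : ν) (f : ν → ν) :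
    d.modify k d0 f = d.insert k (f (d.getD k d0)) := PySem.Dict.ext_iff.mpr rfl

lemma pvRep_items (g : PySem.Dict String (List Bool)) :
    (pvRep g).items = g.items.map (fun p => (p.1, pvTally p.2)) := rfl

lemma pvKeys_pvRep (g : PySem.Dict String (List Bool)) : (pvRep g).keys = g.keys := by
  simp [pvRep, PySem.Dict.keys]

lemma pvContains_pvRep (g : PySem.Dict String (List Bool)) (s : String) :
    (pvRep g).contains s = g.contains s := by
  rw [PySem.Dict.contains_eq_decide_mem_keys, PySem.Dict.contains_eq_decide_mem_keys, pvKeys_pvRep]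

lemma pvInsert_pvRep (g : PySem.Dict String (List Bool)) (s : String) (fs : List Bool) :
    pvRep (g.insert s fs) = (pvRep g).insert s (pvTally fs) := by
  apply PySem.Dict.ext
  rw [pvRep_items, PySem.Dict.items_insert, PySem.Dict.items_insert, pvContains_pvRep, pvRep_items]
  by_cases hc : g.contains s = true
  · simp only [hc, if_true, List.map_map]
    apply List.map_congr_left
    intro p _
    by_cases hp : p.1 = s <;> simp [Function.comp, hp]
  · simp [hc]

lemma pvTally_nil : PySem.Dict.ofList [("correct", (0 : Int)), ("total", 0)] = pvTally [] := by
  decide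

lemma pvTally_true (fs : List Bool) :
    ((pvTally fs).modify "total" 0 (· + 1)).modify "correct" 0 (· + 1) = pvTally (fs ++ [true]) := by
  simp [pvTally, PySem.Dict.modify, PySem.Dict.insert, PySem.Dict.getD, PySem.Dict.get?,
    PySem.Dict.contains, List.sum_append]

lemma pvTally_false (fs : List Bool) :
    (pvTally fs).modify "total" 0 (· + 1) = pvTally (fs ++ [false]) := by
  simp [pvTally, PySem.Dict.modify, PySem.Dict.insert, PySem.Dict.getD, PySem.Dict.get?,
    PySem.Dict.contains, List.sum_append]

lemma pvGetD_pvRep (g : PySem.Dict String (List Bool)) (s : String) (h : g.keys.Nodup)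
    (hc : g.contains s = true) :
    (pvRep g).getD s PySem.Dict.empty = pvTally (g.getD s []) := by
  have h1 : (g.get? s).isSome := by rw [← PySem.Dict.contains_eq_isSome_get?]; exact hc
  obtain ⟨fs, hfs⟩ := Option.isSome_iff_exists.mp h1
  have hmem : (s, fs) ∈ g.items := PySem.Dict.mem_items_of_get?_eq_some g hfs
  have hmem' : (s, pvTally fs) ∈ (pvRep g).items := by
    rw [pvRep_items]
    exact List.mem_map.mpr ⟨(s, fs), hmem, rfl⟩
  have hnd : (pvRep g).keys.Nodup := by rw [pvKeys_pvRep]; exact h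
  rw [PySem.Dict.getD_of_mem_items _ hmem' hnd, PySem.Dict.getD_of_get?_eq_some g [] hfs]

lemma pvStepAB (g : PySem.Dict String (List Bool)) (q : List (String × String))
    (h : g.keys.Nodup) : pvStepA (pvRep g) q = pvRep (pvStepB g q) := by
  simp only [pvStepA, pvStepB, pvContains_pvRep]
  rw [pvModify_eq_insert g]
  by_cases hc : g.contains (pvLook q "section") = true
  · rw [if_pos hc, pvInsert_pvRep]
    by_cases hb : pvLook q "user_answer" = pvLook q "correct_answer"
    · rw [if_pos hb, decide_eq_true hb]
      simp only [pvModify_eq_insert (ν := PySem.Dict String Int), PySem.Dict.getD_insert_self,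
        PySem.Dict.insert_insert_self, pvGetD_pvRep g _ h hc, pvTally_true]
    · rw [if_neg hb, decide_eq_false hb]
      simp only [pvModify_eq_insert (ν := PySem.Dict String Int),
        pvGetD_pvRep g _ h hc, pvTally_false]
  · rw [if_neg hc, pvInsert_pvRep, PySem.Dict.getD_of_not_contains g [] (by simpa using hc),
      List.nil_append]
    by_cases hb : pvLook q "user_answer" = pvLook q "correct_answer"
    · rw [if_pos hb, decide_eq_true hb]
      simp only [pvModify_eq_insert (ν := PySem.Dict String Int), PySem.Dict.getD_insert_self,
        PySem.Dict.insert_insert_self, pvTally_nil, pvTally_true]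
      rfl
    · rw [if_neg hb, decide_eq_false hb]
      simp only [pvModify_eq_insert (ν := PySem.Dict String Int), PySem.Dict.getD_insert_self,
        PySem.Dict.insert_insert_self, pvTally_nil, pvTally_false]
      rfl

lemma pvFoldAB : ∀ (l : List (List (String × String))) (g : PySem.Dict String (List Bool)),
    g.keys.Nodup → l.foldl pvStepA (pvRep g) = pvRep (l.foldl pvStepB g) := by
  intro l
  induction l with
  | nil => intro g _; rfl
  | cons q t ih =>
    intro g h
    rw [List.foldl_cons, List.foldl_cons, pvStepAB g q h]
    apply ih
    rw [pvStepB, pvModify_eq_insert]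
    exact PySem.Dict.nodup_keys_insert _ _ _ h

lemma pvA_eq (l : List (List (String × String))) :
    section_analysis l = (l.foldl pvStepA PySem.Dict.empty).items.map (fun p => (p.1, p.2.items)) := rfl

lemma pvB_eq (l : List (List (String × String))) :
    section_analysis_alt l = (l.foldl pvStepB PySem.Dict.empty).items.map (fun p =>
      (p.1, [("correct", (p.2.map (fun b => if b then (1 : Int) else 0)).sum),
             ("total", (p.2.length : Int))])) := rfl

-- ===== VERDICT (by name: the statement is the Claim_ definition above) =====
theorem section_analysis_spec : Claim_equal_section_analysis := by
  intro l _ _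
  unfold Spec_section_analysis
  rw [pvA_eq, pvB_eq]
  have h0 : (PySem.Dict.empty : PySem.Dict String (PySem.Dict String Int)) = pvRep PySem.Dict.empty := rfl
  rw [h0, pvFoldAB l PySem.Dict.empty (by simp [PySem.Dict.keys_empty]), pvRep_items, List.map_map]
  apply List.map_congr_left
  intro p _
  rfl
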